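-- pv_equiv track=rewrite | github.com/FGG100y/lc-brain-gym | src/2024E-HWOD/greedy_虚拟游戏理财/script.py | optimal_investment
-- ===== SOURCE A (Python) =====
-- def optimal_investment(m, N, X, returns, risks, max_investments):
--     best_investment = [0] * m
--     max_return = 0
--
--     # 遍历所有两两组合
--     for i in range(m):
--         for j in range(i+1, m):
--             for invest_i in range(min(max_investments[i], N)+1):  # 投资额度限制
--                 invest_j = min(max_investments[j], N - invest_i)  # 只能投资两个产品
--                 total_risk = risks[i] + risks[j]
--                 if total_risk <= X:
--                     total_return = invest_i * returns[i] + invest_j * returns[j]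
--                     if total_return > max_return:
--                         max_return = total_return
--                         best_investment = [0] * m  # 重置结果，以便更新最优组合
--                         best_investment[i] = invest_i
--                         best_investment[j] = invest_j
--     return best_investment
-- ===== SOURCE B (Python) =====
-- def _argmax_split(ri, rj, mj, N, hi):
--     # smallest x in [0, hi] maximizing x*ri + min(mj, N - x)*rj
--     if ri > 0:
--         return hi if ri > rj else min(max(N - mj, 0), hi)
--     if ri <= rj:
--         return 0
--     return 0 if hi * ri + min(mj, N - hi) * rj <= min(mj, N) * rj else hi
--
--
-- def optimal_investment(m, N, X, returns, risks, max_investments):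
--     # Stage 1: one closed-form candidate per admissible pair (no scan over amounts).
--     candidates = [
--         (i, j, _argmax_split(returns[i], returns[j], max_investments[j], N,
--                              min(max_investments[i], N)))
--         for i in range(m)
--         for j in range(i + 1, m)
--         if risks[i] + risks[j] <= X and min(max_investments[i], N) >= 0
--     ]
--     # Stage 2: first strict improvement scan over the candidate list.
--     best, best_val = [0] * m, 0
--     for (i, j, a) in candidates:
--         b_amt = min(max_investments[j], N - a)
--         val = a * returns[i] + b_amt * returns[j]
--         if val > best_val:
--             best_val = val
--             best = [0] * m
--             best[i] = a
--             best[j] = b_amt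
--     return best
-- ===== Notes on version B (the rewrite author's own statement) =====
-- stated objective: faster
-- what changed: B replaces A's per-pair scan over every investment amount by two staged passes: a comprehension that emits one closed-form candidate (the smallest argmax of the pair's piecewise-linear return) per admissible pair, then a single first-strict-improvement scan over that candidate list.
-- outside the precondition, e.g. on optimal_investment(2, -1, 0, [], [], [5, 5]): A returns [0, 0], B raises IndexError
import Mathlib
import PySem

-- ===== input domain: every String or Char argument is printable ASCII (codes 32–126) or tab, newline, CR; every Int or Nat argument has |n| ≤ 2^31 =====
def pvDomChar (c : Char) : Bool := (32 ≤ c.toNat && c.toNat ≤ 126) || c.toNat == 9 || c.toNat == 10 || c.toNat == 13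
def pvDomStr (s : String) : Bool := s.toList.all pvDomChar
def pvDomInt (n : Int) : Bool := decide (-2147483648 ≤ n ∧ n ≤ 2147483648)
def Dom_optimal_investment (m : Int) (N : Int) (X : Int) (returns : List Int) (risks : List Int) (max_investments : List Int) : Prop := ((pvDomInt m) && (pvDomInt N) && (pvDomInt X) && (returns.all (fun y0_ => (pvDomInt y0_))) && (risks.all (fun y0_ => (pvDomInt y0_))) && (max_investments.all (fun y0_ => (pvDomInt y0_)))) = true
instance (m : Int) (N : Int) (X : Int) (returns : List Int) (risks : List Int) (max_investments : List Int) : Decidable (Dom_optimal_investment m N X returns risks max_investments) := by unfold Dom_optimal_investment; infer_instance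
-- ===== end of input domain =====

-- B replaces A's per-pair scan over every amount by two staged passes: one closed-form
-- candidate (smallest argmax of the pair's piecewise-linear return) per admissible pair,
-- then a first-strict-improvement scan over the candidate list.

-- ===== PORT A =====
def optimal_investment (m : Int) (N : Int) (X : Int) (returns : List Int) (risks : List Int) (max_investments : List Int) : List Int :=
  ((PySem.List.pyRange 0 m 1).foldl (fun s i =>
    (PySem.List.pyRange (i+1) m 1).foldl (fun s j =>
      (PySem.List.pyRange 0 (min (PySem.List.pyGetD max_investments i 0) N + 1) 1).foldl (fun s invest_i =>
        if PySem.List.pyGetD risks i 0 + PySem.List.pyGetD risks j 0 ≤ X then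
          if invest_i * PySem.List.pyGetD returns i 0 + min (PySem.List.pyGetD max_investments j 0) (N - invest_i) * PySem.List.pyGetD returns j 0 > s.2 then
            (((List.replicate m.toNat 0).set i.natAbs invest_i).set j.natAbs (min (PySem.List.pyGetD max_investments j 0) (N - invest_i)),
             invest_i * PySem.List.pyGetD returns i 0 + min (PySem.List.pyGetD max_investments j 0) (N - invest_i) * PySem.List.pyGetD returns j 0)
          else s
        else s) s) s)
    (List.replicate m.toNat 0, 0)).1

-- ===== PORT B =====
-- B-side helper: smallest x in [0, hi] maximizing x*ri + min(mj, N - x)*rj (closed form)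
def pvArgmaxSplit (ri rj mj N hi : Int) : Int :=
  if ri > 0 then (if ri > rj then hi else min (max (N - mj) 0) hi)
  else if ri ≤ rj then 0
  else if hi * ri + min mj (N - hi) * rj ≤ min mj N * rj then 0 else hi

def optimal_investment_alt (m : Int) (N : Int) (X : Int) (returns : List Int) (risks : List Int) (max_investments : List Int) : List Int :=
  let candidates : List (Int × Int × Int) :=
    (PySem.List.pyRange 0 m 1).flatMap (fun i =>
      (PySem.List.pyRange (i+1) m 1).filterMap (fun j =>
        if PySem.List.pyGetD risks i 0 + PySem.List.pyGetD risks j 0 ≤ X ∧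
            min (PySem.List.pyGetD max_investments i 0) N ≥ 0 then
          some (i, j, pvArgmaxSplit (PySem.List.pyGetD returns i 0) (PySem.List.pyGetD returns j 0)
                        (PySem.List.pyGetD max_investments j 0) N (min (PySem.List.pyGetD max_investments i 0) N))
        else none))
  (candidates.foldl (fun s c =>
      let b_amt := min (PySem.List.pyGetD max_investments c.2.1 0) (N - c.2.2)
      let val := c.2.2 * PySem.List.pyGetD returns c.1 0 + b_amt * PySem.List.pyGetD returns c.2.1 0
      if val > s.2 then
        (((List.replicate m.toNat 0).set c.1.natAbs c.2.2).set c.2.1.natAbs b_amt, val)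
      else s)
    (List.replicate m.toNat 0, 0)).1

-- ===== PRECONDITION & SPEC =====
-- Pre_ excludes inputs where m exceeds the length of returns, risks or max_investments:
-- there A raises IndexError (except when every inner loop happens to be empty).
def Pre_optimal_investment (m : Int) (N : Int) (X : Int) (returns : List Int) (risks : List Int) (max_investments : List Int) : Prop :=
  m ≤ (returns.length : Int) ∧ m ≤ (risks.length : Int) ∧ m ≤ (max_investments.length : Int)
instance (m : Int) (N : Int) (X : Int) (returns : List Int) (risks : List Int) (max_investments : List Int) : Decidable (Pre_optimal_investment m N X returns risks max_investments) := by unfold Pre_optimal_investment; infer_instance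
def pvWitness_optimal_investment : Int × Int × Int × List Int × List Int × List Int := (3, 5, 10, [4,5,6], [2,3,4], [5,5,5])

def Spec_optimal_investment (m : Int) (N : Int) (X : Int) (returns : List Int) (risks : List Int) (max_investments : List Int) (out : List Int) : Prop := out = optimal_investment_alt m N X returns risks max_investments
instance (m : Int) (N : Int) (X : Int) (returns : List Int) (risks : List Int) (max_investments : List Int) (out : List Int) : Decidable (Spec_optimal_investment m N X returns risks max_investments out) := by unfold Spec_optimal_investment; infer_instance

-- ===== CLAIM (what is proved, stated in full; the proofs are below) =====
def Claim_equal_optimal_investment : Prop := ∀ (m : Int) (N : Int) (X : Int) (returns : List Int) (risks : List Int) (max_investments : List Int), Dom_optimal_investment m N X returns risks max_investments → Pre_optimal_investment m N X returns risks max_investments → Spec_optimal_investment m N X returns risks max_investments (optimal_investment m N X returns risks max_investments)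

-- ===== LEMMAS AND PROOFS =====

-- f(x) = x*ri + min(mj, N-x)*rj : the return of a pair when the first product gets x
def pvF (ri rj mj N x : Int) : Int := x * ri + min mj (N - x) * rj

-- "first strict improvement" skeleton of the running-max loop
def pvBestOf (f : Int → Int) (v : Int) : List Int → Option (Int × Int)
  | [] => none
  | x :: L => if f x > v then
      (match pvBestOf f (f x) L with
       | none => some (x, f x)
       | some p => some p)
    else pvBestOf f v L

theorem pv_fold_eq_bestOf (f : Int → Int) (mk : Int → List Int) (L : List Int) :
    ∀ (b : List Int) (v : Int),
    L.foldl (fun s x => if f x > s.2 then (mk x, f x) else s) (b, v)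
      = match pvBestOf f v L with
        | none => (b, v)
        | some p => (mk p.1, p.2) := by
  induction L with
  | nil => intro b v; rfl
  | cons x L ih =>
    intro b v
    simp only [List.foldl_cons, pvBestOf]
    by_cases h : f x > v
    · simp only [if_pos h]
      rw [ih (mk x) (f x)]
      cases pvBestOf f (f x) L <;> rfl
    · simp only [if_neg h]
      exact ih b v

theorem pv_bestOf_none (f : Int → Int) (v : Int) (L : List Int) (h : ∀ x ∈ L, f x ≤ v) :
    pvBestOf f v L = none := by
  induction L with
  | nil => rfl
  | cons x L ih =>
    have hx := h x (List.mem_cons_self)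
    simp only [pvBestOf, if_neg (not_lt.mpr hx)]
    exact ih (fun y hy => h y (List.mem_cons_of_mem _ hy))

theorem pv_bestOf_spec (f : Int → Int) (a : Int) :
    ∀ (L : List Int), L.Pairwise (· < ·) → a ∈ L →
    (∀ x ∈ L, f x ≤ f a) → (∀ x ∈ L, x < a → f x < f a) →
    ∀ v, pvBestOf f v L = if f a > v then some (a, f a) else none := by
  intro L
  induction L with
  | nil => intro _ hm; exact absurd hm (List.not_mem_nil)
  | cons x L ih =>
    intro hp hm hmax hfst v
    have hpL : L.Pairwise (· < ·) := (List.pairwise_cons.mp hp).2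
    have hx : ∀ y ∈ L, x < y := (List.pairwise_cons.mp hp).1
    rcases List.mem_cons.mp hm with rfl | hmL
    · by_cases h : f a > v
      · simp only [pvBestOf, if_pos h]
        rw [pv_bestOf_none f (f a) L (fun y hy => hmax y (List.mem_cons_of_mem _ hy))]
        try simp [h]
      · simp only [pvBestOf, if_neg h]
        rw [pv_bestOf_none f v L
          (fun y hy => le_trans (hmax y (List.mem_cons_of_mem _ hy)) (not_lt.mp h))]
        try simp [h]
    · have hxa : x < a := hx a hmL
      have hfx : f x < f a := hfst x (List.mem_cons_self) hxa
      have hmax' : ∀ y ∈ L, f y ≤ f a := fun y hy => hmax y (List.mem_cons_of_mem _ hy)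
      have hfst' : ∀ y ∈ L, y < a → f y < f a := fun y hy => hfst y (List.mem_cons_of_mem _ hy)
      by_cases h : f x > v
      · simp only [pvBestOf, if_pos h]
        rw [ih hpL hmL hmax' hfst' (f x), if_pos hfx]
        simp [lt_trans h hfx]
      · simp only [pvBestOf, if_neg h]
        exact ih hpL hmL hmax' hfst' v

-- linear-function monotonicity
theorem pv_lin_le {s x y : Int} (hs : 0 ≤ s) (h : x ≤ y) (c : Int) : x*s + c ≤ y*s + c := by nlinarith
theorem pv_lin_lt {s x y : Int} (hs : 0 < s) (h : x < y) (c : Int) : x*s + c < y*s + c := by nlinarith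
theorem pv_lin_anti {s x y : Int} (hs : s ≤ 0) (h : x ≤ y) (c : Int) : y*s + c ≤ x*s + c := by nlinarith

theorem pvF_g1 {ri rj mj N x : Int} (h : x ≤ N - mj) : pvF ri rj mj N x = x * ri + mj * rj := by
  unfold pvF; rw [min_eq_left (by omega)]
theorem pvF_g2 {ri rj mj N x : Int} (h : N - mj ≤ x) : pvF ri rj mj N x = x * (ri - rj) + N * rj := by
  unfold pvF; rw [min_eq_right (by omega)]; ring

theorem pvArgmaxSplit_cases (ri rj mj N hi : Int) :
    pvArgmaxSplit ri rj mj N hi = 0 ∨ pvArgmaxSplit ri rj mj N hi = min (max (N - mj) 0) hi ∨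
      pvArgmaxSplit ri rj mj N hi = hi := by
  unfold pvArgmaxSplit; split_ifs <;> tauto

theorem pvArgmaxSplit_bounds (ri rj mj N hi : Int) (hhi : 0 ≤ hi) :
    0 ≤ pvArgmaxSplit ri rj mj N hi ∧ pvArgmaxSplit ri rj mj N hi ≤ hi := by
  rcases pvArgmaxSplit_cases ri rj mj N hi with h | h | h <;> rw [h] <;> omega

theorem pvArgmaxSplit_max (ri rj mj N hi : Int) (hhi : 0 ≤ hi) (x : Int) (hx0 : 0 ≤ x) (hxhi : x ≤ hi) :
    pvF ri rj mj N x ≤ pvF ri rj mj N (pvArgmaxSplit ri rj mj N hi) ∧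
      (x < pvArgmaxSplit ri rj mj N hi → pvF ri rj mj N x < pvF ri rj mj N (pvArgmaxSplit ri rj mj N hi)) := by
  unfold pvArgmaxSplit
  by_cases h1 : ri > 0
  · by_cases h2 : ri > rj
    · simp only [if_pos h1, if_pos h2]
      by_cases hxt : x ≤ N - mj
      · by_cases hht : hi ≤ N - mj
        · rw [pvF_g1 hxt, pvF_g1 hht]
          exact ⟨pv_lin_le h1.le hxhi _, fun hlt => pv_lin_lt h1 hlt _⟩
        · push_neg at hht
          rw [pvF_g1 hxt, pvF_g2 hht.le]
          have c1 : x * ri + mj * rj ≤ (N - mj) * ri + mj * rj := pv_lin_le h1.le hxt _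
          have c2 : (N - mj) * ri + mj * rj = (N - mj) * (ri - rj) + N * rj := by ring
          have c3 : (N - mj) * (ri - rj) + N * rj < hi * (ri - rj) + N * rj :=
            pv_lin_lt (by omega) hht _
          exact ⟨by linarith, fun _ => by linarith⟩
      · push_neg at hxt
        have hth : N - mj ≤ hi := by omega
        rw [pvF_g2 hxt.le, pvF_g2 hth]
        exact ⟨pv_lin_le (by omega) hxhi _, fun hlt => pv_lin_lt (by omega) hlt _⟩
    · simp only [if_pos h1, if_neg h2]
      push_neg at h2
      have h2' : ri - rj ≤ 0 := by omega
      by_cases ht0 : N - mj ≤ 0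
      · have hb : min (max (N - mj) 0) hi = 0 := by omega
        rw [hb, pvF_g2 (by omega), pvF_g2 (by omega : N - mj ≤ (0:Int))]
        exact ⟨pv_lin_anti h2' hx0 _, fun hlt => absurd hlt (by omega)⟩
      · push_neg at ht0
        by_cases hthi : N - mj ≤ hi
        · have hb : min (max (N - mj) 0) hi = N - mj := by omega
          rw [hb]
          by_cases hxt : x ≤ N - mj
          · rw [pvF_g1 hxt, pvF_g1 (le_refl _)]
            exact ⟨pv_lin_le h1.le hxt _, fun hlt => pv_lin_lt h1 hlt _⟩
          · push_neg at hxt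
            rw [pvF_g2 hxt.le, pvF_g1 (le_refl _)]
            have c1 : x * (ri - rj) + N * rj ≤ (N - mj) * (ri - rj) + N * rj :=
              pv_lin_anti h2' hxt.le _
            have c2 : (N - mj) * (ri - rj) + N * rj = (N - mj) * ri + mj * rj := by ring
            exact ⟨by linarith, fun hlt => absurd hlt (by omega)⟩
        · push_neg at hthi
          have hb : min (max (N - mj) 0) hi = hi := by omega
          rw [hb, pvF_g1 (by omega), pvF_g1 (by omega)]
          exact ⟨pv_lin_le h1.le hxhi _, fun hlt => pv_lin_lt h1 hlt _⟩
  · push_neg at h1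
    by_cases h2 : ri ≤ rj
    · simp only [if_neg (by omega : ¬ ri > 0), if_pos h2]
      have h2' : ri - rj ≤ 0 := by omega
      refine ⟨?_, fun hlt => absurd hlt (by omega)⟩
      by_cases hxt : x ≤ N - mj
      · rw [pvF_g1 hxt, pvF_g1 (by omega : (0:Int) ≤ N - mj)]
        linarith [pv_lin_anti h1 hx0 (mj * rj)]
      · push_neg at hxt
        rw [pvF_g2 hxt.le]
        by_cases ht0 : N - mj ≤ 0
        · rw [pvF_g2 ht0]
          exact pv_lin_anti h2' hx0 _
        · push_neg at ht0
          rw [pvF_g1 (by omega : (0:Int) ≤ N - mj)]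
          have c1 : x * (ri - rj) + N * rj ≤ (N - mj) * (ri - rj) + N * rj :=
            pv_lin_anti h2' hxt.le _
          have c2 : (N - mj) * (ri - rj) + N * rj = (N - mj) * ri + mj * rj := by ring
          have c3 : (N - mj) * ri + mj * rj ≤ 0 * ri + mj * rj := pv_lin_anti h1 ht0.le _
          linarith
    · push_neg at h2
      simp only [if_neg (by omega : ¬ ri > 0), if_neg (by omega : ¬ ri ≤ rj)]
      have hD0 : min mj N * rj = pvF ri rj mj N 0 := by unfold pvF; ring_nf
      by_cases hD : hi * ri + min mj (N - hi) * rj ≤ min mj N * rj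
      · rw [if_pos hD]
        have hD' : pvF ri rj mj N hi ≤ pvF ri rj mj N 0 := by
          unfold pvF; rw [hD0] at hD; unfold pvF at hD; linarith
        refine ⟨?_, fun hlt => absurd hlt (by omega)⟩
        by_cases hxt : x ≤ N - mj
        · rw [pvF_g1 hxt, pvF_g1 (by omega : (0:Int) ≤ N - mj)]
          linarith [pv_lin_anti h1 hx0 (mj * rj)]
        · push_neg at hxt
          have hth : N - mj ≤ hi := by omega
          have c1 : pvF ri rj mj N x ≤ pvF ri rj mj N hi := by
            rw [pvF_g2 hxt.le, pvF_g2 hth]; exact pv_lin_le (by omega) hxhi _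
          exact le_trans c1 hD'
      · rw [if_neg hD]
        push_neg at hD
        have hD' : pvF ri rj mj N 0 < pvF ri rj mj N hi := by
          unfold pvF; rw [hD0] at hD; unfold pvF at hD; linarith
        by_cases hxt : x ≤ N - mj
        · have h0t : (0:Int) ≤ N - mj := by omega
          have c1 : pvF ri rj mj N x ≤ pvF ri rj mj N 0 := by
            rw [pvF_g1 hxt, pvF_g1 h0t]
            linarith [pv_lin_anti h1 hx0 (mj * rj)]
          exact ⟨le_trans c1 hD'.le, fun _ => lt_of_le_of_lt c1 hD'⟩
        · push_neg at hxt
          have hth : N - mj ≤ hi := by omega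
          rw [pvF_g2 hxt.le, pvF_g2 hth]
          exact ⟨pv_lin_le (by omega) hxhi _, fun hlt => pv_lin_lt (by omega) hlt _⟩

-- one pair: A's full scan over [0, hi] collapses to the single-candidate step at the argmax
theorem pv_pair_collapse (ri rj mj N hi : Int) (hhi : 0 ≤ hi) (mk : Int → List Int)
    (s : List Int × Int) :
    (PySem.List.pyRange 0 (hi+1) 1).foldl
        (fun s x => if pvF ri rj mj N x > s.2 then (mk x, pvF ri rj mj N x) else s) s
      = (if pvF ri rj mj N (pvArgmaxSplit ri rj mj N hi) > s.2 then
          (mk (pvArgmaxSplit ri rj mj N hi), pvF ri rj mj N (pvArgmaxSplit ri rj mj N hi))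
        else s) := by
  obtain ⟨b, v⟩ := s
  rw [pv_fold_eq_bestOf]
  obtain ⟨ha0, hahi⟩ := pvArgmaxSplit_bounds ri rj mj N hi hhi
  have hmem : pvArgmaxSplit ri rj mj N hi ∈ PySem.List.pyRange 0 (hi+1) 1 :=
    (PySem.List.mem_pyRange_one).mpr ⟨ha0, by omega⟩
  have hmax : ∀ x ∈ PySem.List.pyRange 0 (hi+1) 1,
      pvF ri rj mj N x ≤ pvF ri rj mj N (pvArgmaxSplit ri rj mj N hi) := by
    intro x hx
    rw [PySem.List.mem_pyRange_one] at hx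
    exact (pvArgmaxSplit_max ri rj mj N hi hhi x hx.1 (by omega)).1
  have hfst : ∀ x ∈ PySem.List.pyRange 0 (hi+1) 1, x < pvArgmaxSplit ri rj mj N hi →
      pvF ri rj mj N x < pvF ri rj mj N (pvArgmaxSplit ri rj mj N hi) := by
    intro x hx
    rw [PySem.List.mem_pyRange_one] at hx
    exact (pvArgmaxSplit_max ri rj mj N hi hhi x hx.1 (by omega)).2
  rw [pv_bestOf_spec (pvF ri rj mj N) (pvArgmaxSplit ri rj mj N hi) _
        (PySem.List.pairwise_lt_pyRange_one 0 (hi+1)) hmem hmax hfst v]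
  split_ifs <;> rfl

-- a fold whose step never changes the state
theorem pv_foldl_id {α β : Type} (f : α → β → α) (hf : ∀ s x, f s x = s) (L : List β) :
    ∀ s, L.foldl f s = s := by
  induction L with
  | nil => intro s; rfl
  | cons x L ih => intro s; rw [List.foldl_cons, hf]; exact ih s

-- folding over a filterMap = folding with an Option-valued step
theorem pv_foldl_filterMap {α β γ : Type} (g : β → Option γ) (h : α → γ → α) (L : List β) :
    ∀ s : α, (L.filterMap g).foldl h s
      = L.foldl (fun s x => ((g x).map (h s)).getD s) s := by
  induction L with
  | nil => intro s; rfl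
  | cons x L ih =>
    intro s
    cases hg : g x <;> simp [List.filterMap_cons, hg, ih]

-- folding over a flatMap = nested folds
theorem pv_foldl_flatMap {α β γ : Type} (g : β → List γ) (h : α → γ → α) (L : List β) :
    ∀ s : α, (L.flatMap g).foldl h s = L.foldl (fun s x => (g x).foldl h s) s := by
  induction L with
  | nil => intro s; rfl
  | cons x L ih => intro s; simp [List.flatMap_cons, List.foldl_append, ih]

-- ===== VERDICT (by name: the statement is the Claim_ definition above) =====
theorem optimal_investment_spec : Claim_equal_optimal_investment := by
  intro m N X returns risks max_investments _ _
  unfold Spec_optimal_investment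
  have hstep : ∀ (i j : Int) (s : List Int × Int),
      (PySem.List.pyRange 0 (min (PySem.List.pyGetD max_investments i 0) N + 1) 1).foldl
        (fun s invest_i =>
          if PySem.List.pyGetD risks i 0 + PySem.List.pyGetD risks j 0 ≤ X then
            if invest_i * PySem.List.pyGetD returns i 0 + min (PySem.List.pyGetD max_investments j 0) (N - invest_i) * PySem.List.pyGetD returns j 0 > s.2 then
              (((List.replicate m.toNat 0).set i.natAbs invest_i).set j.natAbs (min (PySem.List.pyGetD max_investments j 0) (N - invest_i)),
               invest_i * PySem.List.pyGetD returns i 0 + min (PySem.List.pyGetD max_investments j 0) (N - invest_i) * PySem.List.pyGetD returns j 0)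
            else s
          else s) s
    = (((if PySem.List.pyGetD risks i 0 + PySem.List.pyGetD risks j 0 ≤ X ∧
            min (PySem.List.pyGetD max_investments i 0) N ≥ 0 then
          some (i, j, pvArgmaxSplit (PySem.List.pyGetD returns i 0) (PySem.List.pyGetD returns j 0)
                        (PySem.List.pyGetD max_investments j 0) N (min (PySem.List.pyGetD max_investments i 0) N))
        else (none : Option (Int × Int × Int))).map (fun c =>
          if c.2.2 * PySem.List.pyGetD returns c.1 0 + min (PySem.List.pyGetD max_investments c.2.1 0) (N - c.2.2) * PySem.List.pyGetD returns c.2.1 0 > s.2 then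
            (((List.replicate m.toNat 0).set c.1.natAbs c.2.2).set c.2.1.natAbs (min (PySem.List.pyGetD max_investments c.2.1 0) (N - c.2.2)),
             c.2.2 * PySem.List.pyGetD returns c.1 0 + min (PySem.List.pyGetD max_investments c.2.1 0) (N - c.2.2) * PySem.List.pyGetD returns c.2.1 0)
          else s)).getD s) := by
    intro i j s
    by_cases hrisk : PySem.List.pyGetD risks i 0 + PySem.List.pyGetD risks j 0 ≤ X
    · by_cases hneg : min (PySem.List.pyGetD max_investments i 0) N ≥ 0
      · rw [if_pos ⟨hrisk, hneg⟩]
        have hpc := pv_pair_collapse (PySem.List.pyGetD returns i 0) (PySem.List.pyGetD returns j 0)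
          (PySem.List.pyGetD max_investments j 0) N (min (PySem.List.pyGetD max_investments i 0) N)
          hneg
          (fun x => ((List.replicate m.toNat 0).set i.natAbs x).set j.natAbs
            (min (PySem.List.pyGetD max_investments j 0) (N - x))) s
        simp only [if_pos hrisk, Option.map_some, Option.getD_some]
        simpa [pvF] using hpc
      · rw [if_neg (by tauto)]
        push_neg at hneg
        rw [PySem.List.pyRange_one_eq_nil (by omega)]
        rfl
    · rw [if_neg (by tauto)]
      exact pv_foldl_id _ (fun s x => by simp [if_neg hrisk]) _ s
  simp only [optimal_investment, optimal_investment_alt]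
  rw [pv_foldl_flatMap]
  simp only [pv_foldl_filterMap]
  simp only [hstep]
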